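-- pv_equiv track=rewrite | github.com/doyun-gu/hack-a-bot-2026 | firmware/01-v1/master/energy_signature.py | zero_crossings
-- ===== SOURCE A (Python) =====
-- def zero_crossings(samples, mean_val):
--     """Count how many times signal crosses the mean per window."""
--     count = 0
--     above = samples[0] > mean_val
--     for s in samples[1:]:
--         now_above = s > mean_val
--         if now_above != above:
--             count += 1
--             above = now_above
--     return count
-- ===== SOURCE B (Python) =====
-- def zero_crossings(samples, mean_val):
--     """Count how many times signal crosses the mean per window."""
--     flags = [s > mean_val for s in samples]
--
--     def crossings(lo, hi):
--         # number of adjacent flips inside flags[lo:hi], by divide and conquer: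
--         # split at the midpoint; the only flip not inside a half is the one
--         # straddling the boundary (mid-1, mid).
--         if hi - lo < 2:
--             return 0
--         mid = (lo + hi) // 2
--         boundary = 1 if flags[mid - 1] != flags[mid] else 0
--         return crossings(lo, mid) + boundary + crossings(mid, hi)
--
--     return crossings(0, len(flags))
-- ===== Notes on version B (the rewrite author's own statement) =====
-- stated objective: alternative
-- what changed: Replaces A's stateful left-to-right scan tracking a running 'above' flag with a divide-and-conquer recursion that splits the window at the midpoint and adds the two halves' crossing counts plus the boundary flip.
import Mathlib
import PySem

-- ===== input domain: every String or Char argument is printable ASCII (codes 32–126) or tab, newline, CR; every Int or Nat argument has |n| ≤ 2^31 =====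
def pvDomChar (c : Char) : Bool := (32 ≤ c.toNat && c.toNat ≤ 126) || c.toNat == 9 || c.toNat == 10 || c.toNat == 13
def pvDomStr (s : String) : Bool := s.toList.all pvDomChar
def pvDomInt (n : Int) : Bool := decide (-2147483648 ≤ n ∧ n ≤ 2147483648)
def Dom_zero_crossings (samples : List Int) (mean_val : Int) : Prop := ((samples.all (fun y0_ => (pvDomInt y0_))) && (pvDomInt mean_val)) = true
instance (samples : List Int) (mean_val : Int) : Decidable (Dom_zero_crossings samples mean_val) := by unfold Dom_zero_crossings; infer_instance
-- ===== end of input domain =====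

-- B replaces A's stateful left-to-right scan with a divide-and-conquer recursion
-- over index ranges of the flag list (objective: alternative decomposition).

-- ===== PORT A =====
-- A: count = 0; above = samples[0] > mean_val; for s in samples[1:]: update (count, above).
def zero_crossings (samples : List Int) (mean_val : Int) : Int :=
  match samples with
  | [] => 0  -- Python raises IndexError here (samples[0]); excluded by Pre_
  | h :: t =>
    (t.foldl (fun st s =>
        let now_above := decide (s > mean_val)
        if now_above != st.2 then (st.1 + 1, now_above) else st)
      ((0 : Int), decide (h > mean_val))).1

-- ===== PORT B =====
-- B's inner helper: crossings(lo, hi) = flips inside flags[lo:hi], split at the midpoint.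
-- (fuel makes the recursion structural; fuel = hi - lo always suffices, proved below)
def pvCross (flags : List Bool) : Nat → Nat → Nat → Int
  | 0, _, _ => 0
  | fuel + 1, lo, hi =>
    if hi - lo < 2 then 0
    else
      let mid := (lo + hi) / 2
      let boundary : Int := if flags.getD (mid - 1) false != flags.getD mid false then 1 else 0
      pvCross flags fuel lo mid + boundary + pvCross flags fuel mid hi

-- B: flags = [s > mean_val for s in samples]; return crossings(0, len(flags)).
def zero_crossings_alt (samples : List Int) (mean_val : Int) : Int :=
  let flags := samples.map (fun s => decide (s > mean_val))
  pvCross flags flags.length 0 flags.length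

-- ===== PRECONDITION & SPEC =====
-- Pre_ excludes only the empty list, on which A raises IndexError via samples[0].
def Pre_zero_crossings (samples : List Int) (mean_val : Int) : Prop := samples ≠ []
instance (samples : List Int) (mean_val : Int) : Decidable (Pre_zero_crossings samples mean_val) := by unfold Pre_zero_crossings; infer_instance

def pvWitness_zero_crossings : List Int × Int := ([1, 5, 2, 7], 3)

def Spec_zero_crossings (samples : List Int) (mean_val : Int) (out : Int) : Prop := out = zero_crossings_alt samples mean_val
instance (samples : List Int) (mean_val : Int) (out : Int) : Decidable (Spec_zero_crossings samples mean_val out) := by unfold Spec_zero_crossings; infer_instance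

-- ===== CLAIM =====
def Claim_equal_zero_crossings : Prop := ∀ (samples : List Int) (mean_val : Int), Dom_zero_crossings samples mean_val → Pre_zero_crossings samples mean_val → Spec_zero_crossings samples mean_val (zero_crossings samples mean_val)

-- ===== LEMMAS AND PROOFS =====
-- reference count: number of adjacent flips in ab :: l
def pvCnt (ab : Bool) : List Bool → Int
  | [] => 0
  | x :: xs => (if x != ab then 1 else 0) + pvCnt x xs

theorem pvCnt_A (mean_val : Int) : ∀ (t : List Int) (c : Int) (ab : Bool),
    (t.foldl (fun st s =>
        let now_above := decide (s > mean_val)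
        if now_above != st.2 then (st.1 + 1, now_above) else st)
      (c, ab)).1 = c + pvCnt ab (t.map (fun s => decide (s > mean_val))) := by
  intro t
  induction t with
  | nil => intro c ab; simp [pvCnt]
  | cons x xs ih =>
    intro c ab
    simp only [List.foldl_cons, List.map_cons, pvCnt]
    by_cases h : (decide (x > mean_val) != ab) = true
    · rw [if_pos h, if_pos h, ih]; ring
    · rw [if_neg h, if_neg h, ih]
      have hx : decide (x > mean_val) = ab := by simpa [bne_iff_ne] using h
      rw [hx]; ring

-- step-by-one reference version of pvCross
def pvSeg (flags : List Bool) (lo hi : Nat) : Int :=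
  if lo + 1 < hi then
    (if flags.getD lo false != flags.getD (lo + 1) false then 1 else 0) + pvSeg flags (lo + 1) hi
  else 0
termination_by hi - lo
decreasing_by omega

theorem pvSeg_split (flags : List Bool) : ∀ (k lo hi : Nat), lo + k + 1 < hi →
    pvSeg flags lo hi = pvSeg flags lo (lo + k + 1)
      + (if flags.getD (lo + k) false != flags.getD (lo + k + 1) false then 1 else 0)
      + pvSeg flags (lo + k + 1) hi := by
  intro k
  induction k with
  | zero =>
    intro lo hi h
    rw [pvSeg, if_pos (by omega : lo + 1 < hi)]
    rw [show pvSeg flags lo (lo + 0 + 1) = 0 by rw [pvSeg]; simp]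
    simp only [Nat.add_zero]
    ring
  | succ k ih =>
    intro lo hi h
    have h1 : lo + 1 + k + 1 < hi := by omega
    rw [pvSeg, if_pos (by omega : lo + 1 < hi), ih (lo + 1) hi h1]
    rw [show pvSeg flags lo (lo + (k + 1) + 1)
        = (if flags.getD lo false != flags.getD (lo + 1) false then 1 else 0)
          + pvSeg flags (lo + 1) (lo + (k + 1) + 1) by
      rw [pvSeg, if_pos (by omega : lo + 1 < lo + (k + 1) + 1)]]
    have e1 : lo + 1 + k + 1 = lo + (k + 1) + 1 := by omega
    have e2 : lo + 1 + k = lo + (k + 1) := by omega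
    rw [e1, e2]
    ring

theorem pvCross_eq_seg (flags : List Bool) : ∀ (fuel lo hi : Nat), hi - lo ≤ fuel →
    pvCross flags fuel lo hi = pvSeg flags lo hi := by
  intro fuel
  induction fuel with
  | zero =>
    intro lo hi hn
    rw [pvCross, pvSeg, if_neg (by omega)]
  | succ fuel ih =>
    intro lo hi hn
    by_cases h : hi - lo < 2
    · rw [pvCross, if_pos h, pvSeg, if_neg (by omega)]
    · rw [pvCross, if_neg h]
      have hlo : lo < (lo + hi) / 2 := by omega
      have hhi : (lo + hi) / 2 < hi := by omega
      have hL := ih lo ((lo + hi) / 2) (by omega)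
      have hR := ih ((lo + hi) / 2) hi (by omega)
      simp only [hL, hR]
      have hk := pvSeg_split flags ((lo + hi) / 2 - lo - 1) lo hi (by omega)
      have e1 : lo + ((lo + hi) / 2 - lo - 1) + 1 = (lo + hi) / 2 := by omega
      have e2 : lo + ((lo + hi) / 2 - lo - 1) = (lo + hi) / 2 - 1 := by omega
      rw [e1, e2] at hk
      rw [hk]

theorem pvSeg_shift (a : Bool) (flags : List Bool) : ∀ (n lo hi : Nat), hi - lo = n →
    pvSeg (a :: flags) (lo + 1) (hi + 1) = pvSeg flags lo hi := by
  intro n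
  induction n using Nat.strong_induction_on with
  | _ n ih =>
    intro lo hi hn
    by_cases h : lo + 1 < hi
    · rw [pvSeg, if_pos (by omega : lo + 1 + 1 < hi + 1)]
      conv_rhs => rw [pvSeg]
      rw [if_pos h, ih (hi - (lo + 1)) (by omega) (lo + 1) hi rfl]
      simp [List.getD]
    · rw [pvSeg, if_neg (by omega), pvSeg, if_neg h]

theorem pvSeg_eq_cnt : ∀ (l : List Bool) (a : Bool),
    pvSeg (a :: l) 0 (l.length + 1) = pvCnt a l := by
  intro l
  induction l with
  | nil => intro a; rw [pvSeg]; simp [pvCnt]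
  | cons b t ih =>
    intro a
    rw [pvSeg, if_pos (by simp)]
    have := pvSeg_shift a (b :: t) (t.length + 1) 0 (t.length + 1) rfl
    simp only [Nat.zero_add, List.length_cons] at this ⊢
    rw [this, ih b]
    simp [pvCnt, List.getD, bne_comm]

-- ===== VERDICT =====
theorem zero_crossings_spec : Claim_equal_zero_crossings := by
  intro samples mean_val _ hpre
  unfold Spec_zero_crossings zero_crossings zero_crossings_alt
  match samples with
  | [] => exact absurd rfl hpre
  | h :: t =>
    simp only [List.map_cons, List.length_cons]
    rw [pvCnt_A, pvCross_eq_seg _ _ _ _ (by omega), pvSeg_eq_cnt]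
    simp
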